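-- pv_equiv track=rewrite | github.com/pechang03/processDMRs | graph_layout.py | categorize_nodes
-- ===== SOURCE A (Python) =====
-- from typing import Dict, List, Set, Tuple
--
-- def categorize_nodes(
--     all_nodes: Set[int], node_biclique_map: Dict[int, List[int]], min_gene_id: int
-- ) -> Tuple[Set[int], Set[int], Set[int]]:
--     """Categorize nodes into DMRs, regular genes, and split genes."""
--     dmr_nodes = {node for node in all_nodes if node < min_gene_id}
--     gene_nodes = all_nodes - dmr_nodes
--
--     split_genes = {
--         node for node in gene_nodes if len(node_biclique_map.get(node, [])) > 1
--     }
--     regular_genes = gene_nodes - split_genes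
--
--     return dmr_nodes, regular_genes, split_genes
-- ===== SOURCE B (Python) =====
-- def categorize_nodes(all_nodes, node_biclique_map, min_gene_id):
--     """Categorize nodes into DMRs, regular genes, and split genes (single pass)."""
--     dmr_nodes, regular_genes, split_genes = set(), set(), set()
--     for node in all_nodes:
--         if node < min_gene_id:
--             dmr_nodes.add(node)
--         elif len(node_biclique_map.get(node, [])) > 1:
--             split_genes.add(node)
--         else:
--             regular_genes.add(node)
--     return dmr_nodes, regular_genes, split_genes
-- ===== Notes on version B (the rewrite author's own statement) =====
-- stated objective: simpler
-- what changed: Replaces the two set comprehensions and two set differences with one loop over all_nodes that classifies each node directly into one of three sets.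
import Mathlib
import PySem

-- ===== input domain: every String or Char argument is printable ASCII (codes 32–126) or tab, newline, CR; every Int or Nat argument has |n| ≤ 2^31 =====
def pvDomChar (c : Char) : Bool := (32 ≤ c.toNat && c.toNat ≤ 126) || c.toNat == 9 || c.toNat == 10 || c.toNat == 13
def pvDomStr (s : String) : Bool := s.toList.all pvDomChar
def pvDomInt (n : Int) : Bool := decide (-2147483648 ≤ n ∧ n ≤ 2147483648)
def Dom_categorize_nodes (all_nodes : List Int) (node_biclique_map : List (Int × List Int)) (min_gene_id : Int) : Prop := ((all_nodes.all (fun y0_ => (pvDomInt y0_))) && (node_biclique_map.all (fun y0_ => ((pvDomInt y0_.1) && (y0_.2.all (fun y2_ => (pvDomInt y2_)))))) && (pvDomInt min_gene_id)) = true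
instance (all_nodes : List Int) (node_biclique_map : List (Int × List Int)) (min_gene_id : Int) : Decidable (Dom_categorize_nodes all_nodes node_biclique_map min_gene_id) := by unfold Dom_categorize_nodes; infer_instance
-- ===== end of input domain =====

-- B replaces A's two set comprehensions and two set differences with a single classifying
-- loop over all_nodes; the proved equivalence is about the returned sets' element lists.

-- ===== PORT A =====
def categorize_nodes (all_nodes : List Int) (node_biclique_map : List (Int × List Int)) (min_gene_id : Int) : List Int × List Int × List Int :=
  let dmr_nodes := PySem.Set.ofList (all_nodes.filter (fun node => node < min_gene_id))
  let gene_nodes := PySem.Set.diff all_nodes dmr_nodes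
  let split_genes := PySem.Set.ofList (gene_nodes.filter (fun node => 1 < (PySem.Dict.getD (PySem.Dict.mk node_biclique_map) node []).length))
  let regular_genes := PySem.Set.diff gene_nodes split_genes
  (dmr_nodes, regular_genes, split_genes)

-- ===== PORT B =====
def categorize_nodes_alt (all_nodes : List Int) (node_biclique_map : List (Int × List Int)) (min_gene_id : Int) : List Int × List Int × List Int :=
  all_nodes.foldl (fun acc node =>
    if node < min_gene_id then (PySem.Set.add acc.1 node, acc.2.1, acc.2.2)
    else if 1 < (PySem.Dict.getD (PySem.Dict.mk node_biclique_map) node []).length then (acc.1, acc.2.1, PySem.Set.add acc.2.2 node)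
    else (acc.1, PySem.Set.add acc.2.1 node, acc.2.2)) ([], [], [])

-- ===== PRECONDITION & SPEC =====
-- all_nodes is a Python set, so under the type convention its list holds distinct elements.
def Pre_categorize_nodes (all_nodes : List Int) (node_biclique_map : List (Int × List Int)) (min_gene_id : Int) : Prop := all_nodes.Nodup
instance (all_nodes : List Int) (node_biclique_map : List (Int × List Int)) (min_gene_id : Int) : Decidable (Pre_categorize_nodes all_nodes node_biclique_map min_gene_id) := by unfold Pre_categorize_nodes; infer_instance
def pvWitness_categorize_nodes : List Int × (List (Int × List Int)) × Int := ([1, 5, 7, 9], [(5, [1, 2]), (7, [3])], 4)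

def Spec_categorize_nodes (all_nodes : List Int) (node_biclique_map : List (Int × List Int)) (min_gene_id : Int) (out : List Int × List Int × List Int) : Prop := out = categorize_nodes_alt all_nodes node_biclique_map min_gene_id
instance (all_nodes : List Int) (node_biclique_map : List (Int × List Int)) (min_gene_id : Int) (out : List Int × List Int × List Int) : Decidable (Spec_categorize_nodes all_nodes node_biclique_map min_gene_id out) := by unfold Spec_categorize_nodes; infer_instance

-- ===== CLAIM (what is proved, stated in full; the proofs are below) =====
def Claim_equal_categorize_nodes : Prop := ∀ (all_nodes : List Int) (node_biclique_map : List (Int × List Int)) (min_gene_id : Int), Dom_categorize_nodes all_nodes node_biclique_map min_gene_id → Pre_categorize_nodes all_nodes node_biclique_map min_gene_id → Spec_categorize_nodes all_nodes node_biclique_map min_gene_id (categorize_nodes all_nodes node_biclique_map min_gene_id)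

-- ===== LEMMAS AND PROOFS =====

theorem pv_add_of_not_mem (s : List Int) (n : Int) (h : n ∉ s) : PySem.Set.add s n = s ++ [n] := by
  simp [PySem.Set.add, PySem.Set.contains, h]

-- B's single classifying loop, with arbitrary already-built accumulators disjoint from the rest of the input
theorem pv_loopB (node_biclique_map : List (Int × List Int)) (min_gene_id : Int)
    (l d r s : List Int) (hl : l.Nodup)
    (hd : ∀ n ∈ l, n ∉ d) (hr : ∀ n ∈ l, n ∉ r) (hs : ∀ n ∈ l, n ∉ s) :
    l.foldl (fun acc node =>
      if node < min_gene_id then (PySem.Set.add acc.1 node, acc.2.1, acc.2.2)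
      else if 1 < (PySem.Dict.getD (PySem.Dict.mk node_biclique_map) node []).length then (acc.1, acc.2.1, PySem.Set.add acc.2.2 node)
      else (acc.1, PySem.Set.add acc.2.1 node, acc.2.2)) (d, r, s)
    = (d ++ l.filter (fun n => decide (n < min_gene_id)),
       r ++ l.filter (fun n => !decide (n < min_gene_id) && !decide (1 < (PySem.Dict.getD (PySem.Dict.mk node_biclique_map) n []).length)),
       s ++ l.filter (fun n => !decide (n < min_gene_id) && decide (1 < (PySem.Dict.getD (PySem.Dict.mk node_biclique_map) n []).length))) := by
  induction l generalizing d r s with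
  | nil => simp
  | cons x xs ih =>
    have hxd : x ∉ d := hd x (by simp)
    have hxr : x ∉ r := hr x (by simp)
    have hxs : x ∉ s := hs x (by simp)
    have hxxs : x ∉ xs := (List.nodup_cons.mp hl).1
    simp only [List.foldl_cons, List.filter_cons]
    by_cases h1 : x < min_gene_id
    · rw [if_pos h1, pv_add_of_not_mem d x hxd,
        ih (d ++ [x]) r s (List.nodup_cons.mp hl).2
          (fun n hn => by simp; exact ⟨hd n (by simp [hn]), fun he => hxxs (he ▸ hn)⟩)
          (fun n hn => hr n (by simp [hn])) (fun n hn => hs n (by simp [hn]))]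
      simp [h1, List.append_assoc]
    · rw [if_neg h1]
      by_cases h2 : 1 < (PySem.Dict.getD (PySem.Dict.mk node_biclique_map) x []).length
      · rw [if_pos h2, pv_add_of_not_mem s x hxs,
          ih d r (s ++ [x]) (List.nodup_cons.mp hl).2
            (fun n hn => hd n (by simp [hn])) (fun n hn => hr n (by simp [hn]))
            (fun n hn => by simp; exact ⟨hs n (by simp [hn]), fun he => hxxs (he ▸ hn)⟩)]
        simp [h1, h2, List.append_assoc]
      · rw [if_neg h2, pv_add_of_not_mem r x hxr,
          ih d (r ++ [x]) s (List.nodup_cons.mp hl).2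
            (fun n hn => hd n (by simp [hn]))
            (fun n hn => by simp; exact ⟨hr n (by simp [hn]), fun he => hxxs (he ▸ hn)⟩)
            (fun n hn => hs n (by simp [hn]))]
        simp [h1, h2, List.append_assoc]

-- ===== VERDICT (by name: the statement is the Claim_ definition above) =====
theorem categorize_nodes_spec : Claim_equal_categorize_nodes := by
  intro l node_biclique_map min_gene_id _ hpre
  unfold Spec_categorize_nodes categorize_nodes categorize_nodes_alt
  rw [pv_loopB node_biclique_map min_gene_id l [] [] [] hpre
    (by simp) (by simp) (by simp)]
  have hP : PySem.Set.ofList (l.filter (fun node => decide (node < min_gene_id)))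
      = l.filter (fun node => decide (node < min_gene_id)) :=
    PySem.Set.ofList_eq_self_of_nodup _ (hpre.filter _)
  simp only [hP, PySem.Set.diff, PySem.Set.contains]
  have hgene : l.filter (fun x => !(l.filter (fun node => decide (node < min_gene_id))).contains x)
      = l.filter (fun n => !decide (n < min_gene_id)) := by
    apply List.filter_congr
    intro x hx
    simp [hx]
  rw [hgene]
  have hQnd : (l.filter (fun n => !decide (n < min_gene_id))).Nodup := hpre.filter _
  have hS : PySem.Set.ofList ((l.filter (fun n => !decide (n < min_gene_id))).filter
        (fun node => decide (1 < (PySem.Dict.getD (PySem.Dict.mk node_biclique_map) node []).length)))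
      = (l.filter (fun n => !decide (n < min_gene_id))).filter
        (fun node => decide (1 < (PySem.Dict.getD (PySem.Dict.mk node_biclique_map) node []).length)) :=
    PySem.Set.ofList_eq_self_of_nodup _ (hQnd.filter _)
  rw [hS]
  have hreg : (l.filter (fun n => !decide (n < min_gene_id))).filter
        (fun x => !((l.filter (fun n => !decide (n < min_gene_id))).filter
          (fun node => decide (1 < (PySem.Dict.getD (PySem.Dict.mk node_biclique_map) node []).length))).contains x)
      = (l.filter (fun n => !decide (n < min_gene_id))).filter
        (fun n => !decide (1 < (PySem.Dict.getD (PySem.Dict.mk node_biclique_map) n []).length)) := by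
    apply List.filter_congr
    intro x hx
    simp only [List.mem_filter, Bool.not_eq_eq_eq_not, Bool.not_true, decide_eq_false_iff_not, not_lt] at hx
    simp [hx.1, hx.2]
  rw [hreg]
  simp only [List.filter_filter, Prod.mk.injEq]
  exact ⟨rfl, List.filter_congr (fun a _ => Bool.and_comm _ _),
         List.filter_congr (fun a _ => Bool.and_comm _ _)⟩
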